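-- pv_equiv track=rewrite | github.com/theamj/DAT120_Gruppe65 | oppgave_h.py | growth
-- ===== SOURCE A (Python) =====
-- def growth(list):
--     g_units = 0
--     for i in range(len(list)):
--         g_rate = (list)[i] - 5
--         g_units = g_units + g_rate
--         if g_units <= 0:
--             return 0
--     return g_units
-- ===== SOURCE B (Python) =====
-- def _scan(a, lo, hi):
--     # (sum, min-prefix) monoid over the segment a[lo:hi] of adjusted values
--     if hi - lo == 1:
--         v = a[lo] - 5
--         return (v, v)
--     mid = (lo + hi) // 2
--     s1, m1 = _scan(a, lo, mid)
--     s2, m2 = _scan(a, mid, hi)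
--     return (s1 + s2, min(m1, s1 + m2))
--
-- def growth(list):
--     if not list:
--         return 0
--     s, m = _scan(list, 0, len(list))
--     return s if m > 0 else 0
-- ===== Notes on version B (the rewrite author's own statement) =====
-- stated objective: alternative
-- what changed: Replaces A's linear early-exit accumulation with a divide-and-conquer over halves that combines (segment-sum, min-prefix-sum) monoid pairs, then decides the result from the root pair.
import Mathlib
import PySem

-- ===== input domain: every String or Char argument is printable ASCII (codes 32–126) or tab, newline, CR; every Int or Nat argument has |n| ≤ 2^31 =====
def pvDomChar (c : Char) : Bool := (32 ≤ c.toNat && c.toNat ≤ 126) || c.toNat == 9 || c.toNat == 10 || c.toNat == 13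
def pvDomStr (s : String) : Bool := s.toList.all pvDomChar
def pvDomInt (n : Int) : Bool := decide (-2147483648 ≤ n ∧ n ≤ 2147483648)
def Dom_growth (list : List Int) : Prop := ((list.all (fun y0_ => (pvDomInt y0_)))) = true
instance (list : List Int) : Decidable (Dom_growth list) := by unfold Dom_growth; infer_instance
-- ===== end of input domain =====

-- B replaces A's linear early-exit loop with a divide-and-conquer combining (sum, min-prefix) pairs; objective: alternative algorithm.

-- ===== PORT A =====
-- A's loop over indices, carrying g_units; returns 0 as soon as g_units ≤ 0.
def growthLoop (xs : List Int) (g_units : Int) : Int :=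
  match xs with
  | [] => g_units
  | x :: rest =>
    let g_units' := g_units + (x - 5)
    if g_units' ≤ 0 then 0 else growthLoop rest g_units'

def growth (list : List Int) : Int := growthLoop list 0

-- ===== PORT B =====
-- B's _scan: divide the segment in half, combine (sum, min-prefix-sum) pairs.
-- Segments a[lo:hi] are represented as the sublist itself (take/drop at mid = length/2).
def scanB (xs : List Int) : Int × Int :=
  match xs with
  | [] => (0, 0)          -- unreachable in B: growth guards against the empty list
  | [x] => (x - 5, x - 5)
  | x :: y :: rest =>
    let l := x :: y :: rest
    let s1 := scanB (l.take (l.length / 2))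
    let s2 := scanB (l.drop (l.length / 2))
    (s1.1 + s2.1, min s1.2 (s1.1 + s2.2))
termination_by xs.length
decreasing_by
  all_goals simp [List.length_take, List.length_drop]
  all_goals omega

def growth_alt (list : List Int) : Int :=
  match list with
  | [] => 0
  | _ => let p := scanB list
         if p.2 > 0 then p.1 else 0

-- ===== PRECONDITION & SPEC =====
def Spec_growth (list : List Int) (out : Int) : Prop := out = growth_alt list
instance (list : List Int) (out : Int) : Decidable (Spec_growth list out) := by unfold Spec_growth; infer_instance

-- ===== CLAIM (what is proved, stated in full; the proofs are below) =====
def Claim_equal_growth : Prop := ∀ (list : List Int), Dom_growth list → Spec_growth list (growth list)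

-- ===== LEMMAS AND PROOFS =====

-- the monoid operation B combines with
def comb (p q : Int × Int) : Int × Int := (p.1 + q.1, min p.2 (p.1 + q.2))

-- linear right-recursive specification of the (sum, min-prefix) pair
def F : List Int → Int × Int
  | [] => (0, 0)
  | [x] => (x - 5, x - 5)
  | x :: y :: rest => comb (x - 5, x - 5) (F (y :: rest))

theorem comb_assoc (p q r : Int × Int) : comb (comb p q) r = comb p (comb q r) := by
  simp only [comb, Prod.mk.injEq]
  constructor <;> omega

theorem F_cons (x : Int) (l : List Int) (h : l ≠ []) :
    F (x :: l) = comb (x - 5, x - 5) (F l) := by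
  cases l with
  | nil => exact absurd rfl h
  | cons y t => rfl

theorem F_append (xs ys : List Int) (hx : xs ≠ []) (hy : ys ≠ []) :
    F (xs ++ ys) = comb (F xs) (F ys) := by
  induction xs with
  | nil => exact absurd rfl hx
  | cons x t ih =>
    cases t with
    | nil => simpa using F_cons x ys hy
    | cons y t' =>
      have hne : (y :: t') ++ ys ≠ [] := by simp
      calc F ((x :: y :: t') ++ ys)
          = comb (x - 5, x - 5) (F ((y :: t') ++ ys)) := by
            simpa using F_cons x ((y :: t') ++ ys) hne
        _ = comb (x - 5, x - 5) (comb (F (y :: t')) (F ys)) := by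
            rw [ih (by simp)]
        _ = comb (comb (x - 5, x - 5) (F (y :: t'))) (F ys) := (comb_assoc _ _ _).symm
        _ = comb (F (x :: y :: t')) (F ys) := rfl

theorem scanB_eq_F (xs : List Int) : scanB xs = F xs := by
  induction hn : xs.length using Nat.strong_induction_on generalizing xs with
  | _ n ih =>
    match xs with
    | [] => simp [scanB, F]
    | [x] => simp [scanB, F]
    | x :: y :: rest =>
      subst hn
      rw [scanB]
      set l := x :: y :: rest with hl
      have hlen : 2 ≤ l.length := by simp [hl]
      set mid := l.length / 2 with hmid
      have hmid1 : 1 ≤ mid := by omega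
      have hmidlt : mid < l.length := by omega
      have htlen : (l.take mid).length = mid := by
        simp [List.length_take]; omega
      have hdlen : (l.drop mid).length = l.length - mid := by simp
      have h1 : scanB (l.take mid) = F (l.take mid) := ih _ (by omega) _ htlen
      have h2 : scanB (l.drop mid) = F (l.drop mid) := ih _ (by omega) _ hdlen
      have htne : l.take mid ≠ [] := by
        intro h; rw [h] at htlen; simp at htlen; omega
      have hdne : l.drop mid ≠ [] := by
        intro h; rw [h] at hdlen; simp at hdlen; omega
      have := F_append (l.take mid) (l.drop mid) htne hdne
      rw [List.take_append_drop] at this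
      rw [h1, h2, this]
      rfl

theorem growthLoop_cons (x : Int) (rest : List Int) (g : Int) :
    growthLoop (x :: rest) g = if g + (x - 5) ≤ 0 then 0 else growthLoop rest (g + (x - 5)) := rfl

theorem growthLoop_F (xs : List Int) (g : Int) (hx : xs ≠ []) :
    growthLoop xs g = if g + (F xs).2 ≤ 0 then 0 else g + (F xs).1 := by
  induction xs generalizing g with
  | nil => exact absurd rfl hx
  | cons x t ih =>
    cases t with
    | nil =>
      rw [growthLoop_cons]
      by_cases h : g + (x - 5) ≤ 0 <;> simp [h, growthLoop, F]
    | cons y t' =>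
      rw [F_cons x (y :: t') (by simp)]
      rw [growthLoop_cons]
      by_cases h : g + (x - 5) ≤ 0
      · have : g + (comb (x - 5, x - 5) (F (y :: t'))).2 ≤ 0 := by
          simp only [comb]; omega
        simp [h, this]
      · rw [if_neg h, ih (g + (x - 5)) (by simp)]
        simp only [comb]
        by_cases h2 : g + (x - 5) + (F (y :: t')).2 ≤ 0
        · rw [if_pos h2, if_pos (by omega)]
        · rw [if_neg h2, if_neg (by omega)]
          omega

-- ===== VERDICT (by name: the statement is the Claim_ definition above) =====
theorem growth_spec : Claim_equal_growth := by
  intro list _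
  unfold Spec_growth growth growth_alt
  cases list with
  | nil => rfl
  | cons x t =>
    rw [scanB_eq_F, growthLoop_F (x :: t) 0 (by simp)]
    by_cases h : (F (x :: t)).2 ≤ 0
    · simp only []
      rw [if_pos (by omega), if_neg (by omega)]
    · simp only []
      rw [if_neg (by omega), if_pos (by omega)]
      omega
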